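-- pv_equiv track=rewrite | github.com/GGregoryKK/test2 | python/walsh.py | walsh_matrix
-- ===== SOURCE A (Python) =====
-- def walsh_matrix(ca: list, n: int) -> list:
--     """Compute the walsh matrix after `n` transformation with the given matrix.
--
--     Args:
--         ca: given square matrix.
--         n: transformation count.
--
--     Returns:
--         Walsh matrix.
--     """
--     if ca:
--         for _ in range(n):
--             size = len(ca)
--             res = [[0 for _ in range(size << 1)] for _ in range(size << 1)]
--             for irow in range(size):
--                 for icol in range(size):
--                     icol <<= 1
--                     res[irow][icol] = ca[irow][icol >> 1]
--                     res[irow][icol + 1] = ca[irow][icol >> 1]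
--
--                     res[size + irow][icol] = res[irow][icol] * (-1) ** icol
--                     res[size + irow][icol + 1] = res[irow][icol + 1] * (-1) ** (icol + 1)
--             ca = res
--         return ca
--     else:
--         return ca
-- ===== SOURCE B (Python) =====
-- def walsh_matrix(ca: list, n: int) -> list:
--     """Compute the walsh matrix after `n` transformation with the given matrix.
--
--     Kronecker decomposition: the result is the 2^n x 2^n Walsh sign kernel W
--     (built once by row doubling) combined blockwise with the input matrix:
--     entry[R][C] = ca[R % m][C // 2^n] * W[R // m][C % 2^n].
--     """
--     if not ca or n <= 0:
--         return ca
--     m = len(ca)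
--     w = [[1]]
--     for _ in range(n):
--         w = [[x for v in row for x in (v, v)] for row in w] + \
--             [[x for v in row for x in (v, -v)] for row in w]
--     return [[v * s for v in ca[r][:m] for s in wrow] for wrow in w for r in range(m)]
-- ===== Notes on version B (the rewrite author's own statement) =====
-- stated objective: alternative
-- what changed: Replaces the n in-place tensor-doubling passes (each building and index-filling a zeroed matrix twice the size) by a single comprehension that computes every final entry from a closed-form sign formula on the bits of its row and column index.
import Mathlib
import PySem

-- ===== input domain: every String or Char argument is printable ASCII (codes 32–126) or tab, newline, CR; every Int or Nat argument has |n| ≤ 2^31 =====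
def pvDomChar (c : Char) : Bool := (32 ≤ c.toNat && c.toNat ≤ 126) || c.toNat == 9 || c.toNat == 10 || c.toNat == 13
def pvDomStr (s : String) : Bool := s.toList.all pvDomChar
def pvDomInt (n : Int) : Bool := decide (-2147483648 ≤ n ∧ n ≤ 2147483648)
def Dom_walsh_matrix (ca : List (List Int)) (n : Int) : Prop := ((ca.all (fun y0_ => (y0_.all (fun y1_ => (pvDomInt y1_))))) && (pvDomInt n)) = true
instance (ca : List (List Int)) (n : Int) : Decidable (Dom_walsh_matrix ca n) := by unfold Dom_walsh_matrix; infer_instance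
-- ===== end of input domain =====

-- B computes each entry of the final matrix by a closed-form sign formula on the
-- bits of its row/column index, instead of A's n in-place doubling passes.

-- ===== PORT A =====
-- res[i][j] (reads of the freshly built square result, always in range in A)
def pvGet2 (res : List (List Int)) (i j : Nat) : Int := (res.getD i []).getD j 0

-- res[i][j] = v
def pvSet2 (res : List (List Int)) (i j : Nat) (v : Int) : List (List Int) :=
  res.set i ((res.getD i []).set j v)

-- one iteration of A's outer `for _ in range(n)` loop body
def pvPass (ca : List (List Int)) : List (List Int) :=
  let size := ca.length
  let res0 : List (List Int) :=
    (List.range (size <<< 1)).map (fun _ => (List.range (size <<< 1)).map (fun _ => (0 : Int)))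
  (List.range size).foldl (fun res irow =>
    (List.range size).foldl (fun res icol0 =>
      let icol := icol0 <<< 1
      let res := pvSet2 res irow icol ((ca.getD irow []).getD (icol >>> 1) 0)
      let res := pvSet2 res irow (icol + 1) ((ca.getD irow []).getD (icol >>> 1) 0)
      let res := pvSet2 res (size + irow) icol (pvGet2 res irow icol * (-1) ^ icol)
      let res := pvSet2 res (size + irow) (icol + 1) (pvGet2 res irow (icol + 1) * (-1) ^ (icol + 1))
      res) res) res0

def walsh_matrix (ca : List (List Int)) (n : Int) : List (List Int) :=
  if ca ≠ [] then
    (PySem.List.pyRange 0 n 1).foldl (fun acc _ => pvPass acc) ca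
  else ca

-- ===== PORT B =====
-- Source B's kernel-doubling step: w = [duplicated rows] + [alternating-sign rows]
def pvWStep (w : List (List Int)) : List (List Int) :=
  w.map (fun row => row.flatMap (fun v => [v, v]))
    ++ w.map (fun row => row.flatMap (fun v => [v, -v]))

def walsh_matrix_alt (ca : List (List Int)) (n : Int) : List (List Int) :=
  if ca = [] ∨ n ≤ 0 then ca
  else
    let m := ca.length
    let w := (PySem.List.pyRange 0 n 1).foldl (fun w _ => pvWStep w) [[1]]
    w.flatMap (fun wrow =>
      (List.range m).map (fun r =>
        ((ca.getD r []).take m).flatMap (fun v => wrow.map (fun s => v * s))))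

-- ===== PRECONDITION & SPEC =====
-- Pre_ excludes exactly the inputs on which the Python A raises IndexError:
-- a non-empty ragged matrix (some row shorter than the row count) with n ≥ 1.
def Pre_walsh_matrix (ca : List (List Int)) (n : Int) : Prop :=
  ca = [] ∨ n ≤ 0 ∨ ∀ row ∈ ca, ca.length ≤ row.length

instance (ca : List (List Int)) (n : Int) : Decidable (Pre_walsh_matrix ca n) := by
  unfold Pre_walsh_matrix; infer_instance

def pvWitness_walsh_matrix : List (List Int) × Int := ([[1, 1], [1, -1]], 1)

def Spec_walsh_matrix (ca : List (List Int)) (n : Int) (out : List (List Int)) : Prop := out = walsh_matrix_alt ca n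
instance (ca : List (List Int)) (n : Int) (out : List (List Int)) : Decidable (Spec_walsh_matrix ca n out) := by unfold Spec_walsh_matrix; infer_instance

-- ===== CLAIM (what is proved, stated in full; the proofs are below) =====
def Claim_equal_walsh_matrix : Prop := ∀ (ca : List (List Int)) (n : Int), Dom_walsh_matrix ca n → Pre_walsh_matrix ca n → Spec_walsh_matrix ca n (walsh_matrix ca n)

-- ===== LEMMAS AND PROOFS =====

-- the inner loop body of pvPass, named (definitionally equal to the lambda in pvPass)
def pvInner (ca : List (List Int)) (size irow : Nat) (res : List (List Int)) (icol0 : Nat) :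
    List (List Int) :=
  let icol := icol0 <<< 1
  let res := pvSet2 res irow icol ((ca.getD irow []).getD (icol >>> 1) 0)
  let res := pvSet2 res irow (icol + 1) ((ca.getD irow []).getD (icol >>> 1) 0)
  let res := pvSet2 res (size + irow) icol (pvGet2 res irow icol * (-1) ^ icol)
  let res := pvSet2 res (size + irow) (icol + 1) (pvGet2 res irow (icol + 1) * (-1) ^ (icol + 1))
  res

-- the first 2k cells of the top (resp. bottom) row after k inner steps
def pvWrT (row t : List Int) : Nat → List Int
  | 0 => t
  | k + 1 => ((pvWrT row t k).set (2 * k) (row.getD k 0)).set (2 * k + 1) (row.getD k 0)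

def pvWrB (row b : List Int) : Nat → List Int
  | 0 => b
  | k + 1 =>
      ((pvWrB row b k).set (2 * k) (row.getD k 0 * (-1) ^ (2 * k))).set (2 * k + 1)
        (row.getD k 0 * (-1) ^ (2 * k + 1))

def pvTopRow (row : List Int) (s : Nat) : List Int :=
  (List.range (2 * s)).map (fun C => row.getD (C / 2) 0)

def pvBotRow (row : List Int) (s : Nat) : List Int :=
  (List.range (2 * s)).map (fun C => row.getD (C / 2) 0 * (-1) ^ (C % 2))

-- the state of the outer loop of pvPass after k rows have been processed
def pvOuterState (M : List (List Int)) (k : Nat) : List (List Int) :=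
  (List.range (2 * M.length)).map (fun R =>
    if R < k then pvTopRow (M.getD R []) M.length
    else if M.length ≤ R ∧ R < M.length + k then pvBotRow (M.getD (R - M.length) []) M.length
    else (List.range (2 * M.length)).map (fun _ => (0 : Int)))

-- closed form for one pass
def pvPassMat (M : List (List Int)) : List (List Int) :=
  (List.range (2 * M.length)).map (fun R =>
    (List.range (2 * M.length)).map (fun C =>
      (M.getD (R % M.length) []).getD (C / 2) 0 * (-1) ^ (R / M.length * (C % 2))))

-- sign exponent of the Walsh kernel entry (specification device for the proofs)
def pvSgn : Nat → Nat → Nat → Nat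
  | 0, _, _ => 0
  | k + 1, a, b => (a >>> k) * (b % 2) + pvSgn k (a % 2 ^ k) (b / 2)

-- closed form for k passes
def pvGmat (ca : List (List Int)) (k : Nat) : List (List Int) :=
  (List.range (ca.length * 2 ^ k)).map (fun R =>
    (List.range (ca.length * 2 ^ k)).map (fun C =>
      (ca.getD (R % ca.length) []).getD (C / 2 ^ k) 0 *
        (-1) ^ pvSgn k (R / ca.length) (C % 2 ^ k)))

theorem pv_getD_set_self {α : Type} (xs : List α) (i : Nat) (v d : α) (h : i < xs.length) :
    (xs.set i v).getD i d = v := by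
  rw [List.getD_eq_getElem?_getD, List.getElem?_set_self h]
  rfl

theorem pv_getD_set_ne {α : Type} (xs : List α) {i j : Nat} (v : α) (d : α) (h : i ≠ j) :
    (xs.set i v).getD j d = xs.getD j d := by
  rw [List.getD_eq_getElem?_getD, List.getElem?_set_ne h, ← List.getD_eq_getElem?_getD]

theorem pv_getD_eq_getElem {α : Type} (xs : List α) (j : Nat) (d : α) (h : j < xs.length) :
    xs.getD j d = xs[j] := by
  rw [List.getD_eq_getElem?_getD, List.getElem?_eq_getElem h]
  rfl

theorem pv_getD_map_range {α : Type} (f : Nat → α) (n i : Nat) (d : α) (h : i < n) :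
    ((List.range n).map f).getD i d = f i := by
  rw [List.getD_eq_getElem?_getD, List.getElem?_map, List.getElem?_range h]
  rfl

theorem pv_length_wrT (row t : List Int) (k : Nat) : (pvWrT row t k).length = t.length := by
  induction k with
  | zero => rfl
  | succ k ih => simp [pvWrT, ih]

theorem pv_length_wrB (row b : List Int) (k : Nat) : (pvWrB row b k).length = b.length := by
  induction k with
  | zero => rfl
  | succ k ih => simp [pvWrB, ih]

theorem pv_set_getD_self (res : List (List Int)) (i : Nat) (h : i < res.length) :
    res.set i (res.getD i []) = res := by
  apply List.ext_getElem (by simp)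
  intro j hj _
  rw [List.getElem_set]
  split
  · next heq => subst heq; exact pv_getD_eq_getElem _ _ _ h
  · rfl

theorem pv_neg_one_pow_mod_two (j : Nat) : ((-1 : Int)) ^ j = (-1) ^ (j % 2) := by
  conv_lhs => rw [← Nat.div_add_mod j 2]
  rw [pow_add, pow_mul]
  norm_num

theorem pvSet2_pair_top (res : List (List Int)) (T B : List Int) {s irow : Nat}
    (hirow : irow < s) (hlen : res.length = 2 * s) (j : Nat) (v : Int) :
    pvSet2 ((res.set irow T).set (s + irow) B) irow j v
      = (res.set irow (T.set j v)).set (s + irow) B := by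
  have hne : s + irow ≠ irow := by omega
  unfold pvSet2
  rw [pv_getD_set_ne _ _ _ hne, pv_getD_set_self _ _ _ _ (by omega),
    List.set_comm _ _ hne, List.set_set]

theorem pvSet2_pair_bot (res : List (List Int)) (T B : List Int) {s irow : Nat}
    (hirow : irow < s) (hlen : res.length = 2 * s) (j : Nat) (v : Int) :
    pvSet2 ((res.set irow T).set (s + irow) B) (s + irow) j v
      = (res.set irow T).set (s + irow) (B.set j v) := by
  unfold pvSet2
  rw [pv_getD_set_self _ _ _ _ (by simp only [List.length_set]; omega), List.set_set]

theorem pvGet2_pair_top (res : List (List Int)) (T B : List Int) {s irow : Nat}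
    (hirow : irow < s) (hlen : res.length = 2 * s) (j : Nat) :
    pvGet2 ((res.set irow T).set (s + irow) B) irow j = T.getD j 0 := by
  have hne : s + irow ≠ irow := by omega
  unfold pvGet2
  rw [pv_getD_set_ne _ _ _ hne, pv_getD_set_self _ _ _ _ (by omega)]

-- inner loop: after k steps only rows irow and size+irow have changed, as pvWrT/pvWrB
theorem pv_inner_fold (M : List (List Int)) (irow : Nat) (hirow : irow < M.length)
    (res : List (List Int)) (hlen : res.length = 2 * M.length)
    (ht : (res.getD irow []).length = 2 * M.length)
    (hb : (res.getD (M.length + irow) []).length = 2 * M.length) :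
    ∀ k, k ≤ M.length →
      (List.range k).foldl (pvInner M M.length irow) res
        = (res.set irow (pvWrT (M.getD irow []) (res.getD irow []) k)).set
            (M.length + irow) (pvWrB (M.getD irow []) (res.getD (M.length + irow) []) k) := by
  intro k
  induction k with
  | zero =>
      intro _
      simp only [List.range_zero, List.foldl_nil, pvWrT, pvWrB]
      rw [pv_set_getD_self res irow (by omega)]
      rw [pv_set_getD_self res (M.length + irow) (by omega)]
  | succ k ih =>
      intro hk
      rw [List.range_succ, List.foldl_append, ih (by omega), List.foldl_cons, List.foldl_nil]
      have e1 : k <<< 1 = 2 * k := by rw [Nat.shiftLeft_eq]; ring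
      have e2 : (2 * k) >>> 1 = k := by rw [Nat.shiftRight_eq_div_pow]; omega
      simp only [pvInner, e1, e2]
      rw [pvSet2_pair_top res _ _ hirow hlen]
      rw [pvSet2_pair_top res _ _ hirow hlen]
      rw [pvGet2_pair_top res _ _ hirow hlen]
      have g1 : (((pvWrT (M.getD irow []) (res.getD irow []) k).set (2 * k)
            ((M.getD irow []).getD k 0)).set (2 * k + 1) ((M.getD irow []).getD k 0)).getD
            (2 * k) 0 = (M.getD irow []).getD k 0 := by
        rw [pv_getD_set_ne _ _ _ (by omega),
          pv_getD_set_self _ _ _ _ (by rw [pv_length_wrT, ht]; omega)]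
      rw [g1]
      rw [pvSet2_pair_bot res _ _ hirow hlen]
      rw [pvGet2_pair_top res _ _ hirow hlen]
      have g2 : (((pvWrT (M.getD irow []) (res.getD irow []) k).set (2 * k)
            ((M.getD irow []).getD k 0)).set (2 * k + 1) ((M.getD irow []).getD k 0)).getD
            (2 * k + 1) 0 = (M.getD irow []).getD k 0 := by
        rw [pv_getD_set_self _ _ _ _ (by simp only [List.length_set]; rw [pv_length_wrT, ht]; omega)]
      rw [g2]
      rw [pvSet2_pair_bot res _ _ hirow hlen]
      simp only [pvWrT, pvWrB]

theorem pv_wrT_getD (row t : List Int) (k : Nat) (j : Nat) (hj : j < t.length) :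
    (pvWrT row t k).getD j 0 = if j < 2 * k then row.getD (j / 2) 0 else t.getD j 0 := by
  induction k with
  | zero => simp [pvWrT]
  | succ k ih =>
      simp only [pvWrT]
      by_cases h1 : j = 2 * k + 1
      · subst h1
        rw [pv_getD_set_self _ _ _ _ (by simp only [List.length_set, pv_length_wrT]; omega)]
        rw [if_pos (by omega)]
        congr 1
        omega
      · rw [pv_getD_set_ne _ _ _ (fun h => h1 h.symm)]
        by_cases h2 : j = 2 * k
        · subst h2
          rw [pv_getD_set_self _ _ _ _ (by rw [pv_length_wrT]; omega)]
          rw [if_pos (by omega)]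
          congr 1
          omega
        · rw [pv_getD_set_ne _ _ _ (fun h => h2 h.symm), ih]
          by_cases h3 : j < 2 * k
          · rw [if_pos h3, if_pos (by omega)]
          · rw [if_neg h3, if_neg (by omega)]

theorem pv_wrB_getD (row b : List Int) (k : Nat) (j : Nat) (hj : j < b.length) :
    (pvWrB row b k).getD j 0
      = if j < 2 * k then row.getD (j / 2) 0 * (-1) ^ j else b.getD j 0 := by
  induction k with
  | zero => simp [pvWrB]
  | succ k ih =>
      simp only [pvWrB]
      by_cases h1 : j = 2 * k + 1
      · subst h1
        rw [pv_getD_set_self _ _ _ _ (by simp only [List.length_set, pv_length_wrB]; omega)]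
        rw [if_pos (by omega)]
        congr 2
        omega
      · rw [pv_getD_set_ne _ _ _ (fun h => h1 h.symm)]
        by_cases h2 : j = 2 * k
        · subst h2
          rw [pv_getD_set_self _ _ _ _ (by rw [pv_length_wrB]; omega)]
          rw [if_pos (by omega)]
          congr 2
          omega
        · rw [pv_getD_set_ne _ _ _ (fun h => h2 h.symm), ih]
          by_cases h3 : j < 2 * k
          · rw [if_pos h3, if_pos (by omega)]
          · rw [if_neg h3, if_neg (by omega)]

theorem pv_wrT_full (row t : List Int) (s : Nat) (ht : t.length = 2 * s) :
    pvWrT row t s = pvTopRow row s := by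
  apply List.ext_getElem (by simp [pv_length_wrT, pvTopRow, ht])
  intro j h1 h2
  have hj : j < t.length := by rw [← pv_length_wrT row t s]; exact h1
  rw [← pv_getD_eq_getElem _ _ 0 h1, ← pv_getD_eq_getElem _ _ 0 h2,
    pv_wrT_getD row t s j hj, if_pos (by omega)]
  unfold pvTopRow
  rw [pv_getD_map_range _ _ _ _ (by omega)]

theorem pv_wrB_full (row b : List Int) (s : Nat) (hb : b.length = 2 * s) :
    pvWrB row b s = pvBotRow row s := by
  apply List.ext_getElem (by simp [pv_length_wrB, pvBotRow, hb])
  intro j h1 h2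
  have hj : j < b.length := by rw [← pv_length_wrB row b s]; exact h1
  rw [← pv_getD_eq_getElem _ _ 0 h1, ← pv_getD_eq_getElem _ _ 0 h2,
    pv_wrB_getD row b s j hj, if_pos (by omega)]
  unfold pvBotRow
  rw [pv_getD_map_range _ _ _ _ (by omega), pv_neg_one_pow_mod_two]

theorem pv_inner_full (M : List (List Int)) (irow : Nat) (hirow : irow < M.length)
    (res : List (List Int)) (hlen : res.length = 2 * M.length)
    (ht : (res.getD irow []).length = 2 * M.length)
    (hb : (res.getD (M.length + irow) []).length = 2 * M.length) :
    (List.range M.length).foldl (pvInner M M.length irow) res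
      = (res.set irow (pvTopRow (M.getD irow []) M.length)).set
          (M.length + irow) (pvBotRow (M.getD irow []) M.length) := by
  rw [pv_inner_fold M irow hirow res hlen ht hb M.length le_rfl,
    pv_wrT_full _ _ _ ht, pv_wrB_full _ _ _ hb]

theorem pv_outer_fold (M : List (List Int)) :
    ∀ k, k ≤ M.length →
      (List.range k).foldl
          (fun res irow => (List.range M.length).foldl (pvInner M M.length irow) res)
          (pvOuterState M 0)
        = pvOuterState M k := by
  intro k
  induction k with
  | zero => intro _; rfl
  | succ k ih =>
      intro hk
      rw [List.range_succ, List.foldl_append, ih (by omega), List.foldl_cons, List.foldl_nil]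
      have hst : (pvOuterState M k).length = 2 * M.length := by simp [pvOuterState]
      have hrowk : (pvOuterState M k).getD k []
          = (List.range (2 * M.length)).map (fun _ => (0 : Int)) := by
        unfold pvOuterState
        rw [pv_getD_map_range _ _ _ _ (by omega), if_neg (by omega), if_neg (by omega)]
      have hrowsk : (pvOuterState M k).getD (M.length + k) []
          = (List.range (2 * M.length)).map (fun _ => (0 : Int)) := by
        unfold pvOuterState
        rw [pv_getD_map_range _ _ _ _ (by omega), if_neg (by omega), if_neg (by omega)]
      rw [pv_inner_full M k (by omega) _ hst (by rw [hrowk]; simp) (by rw [hrowsk]; simp)]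
      apply List.ext_getElem (by simp [pvOuterState])
      intro R h1 h2
      have hR : R < 2 * M.length := by
        simpa [pvOuterState] using h2
      simp only [List.getElem_set]
      by_cases hR1 : M.length + k = R
      · subst hR1
        rw [if_pos rfl]
        simp only [pvOuterState, List.getElem_map, List.getElem_range]
        rw [if_neg (by omega), if_pos (by omega), Nat.add_sub_cancel_left]
      · rw [if_neg hR1]
        by_cases hR2 : k = R
        · subst hR2
          rw [if_pos rfl]
          simp only [pvOuterState, List.getElem_map, List.getElem_range]
          rw [if_pos (by omega)]
        · rw [if_neg hR2]
          simp only [pvOuterState, List.getElem_map, List.getElem_range]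
          by_cases c1 : R < k
          · rw [if_pos c1, if_pos (by omega)]
          · rw [if_neg c1]
            by_cases c2 : M.length ≤ R ∧ R < M.length + k
            · rw [if_pos c2, if_neg (by omega), if_pos (by omega)]
            · rw [if_neg c2, if_neg (by omega), if_neg (by omega)]

theorem pv_pass_foldl (M : List (List Int)) :
    pvPass M
      = (List.range M.length).foldl
          (fun res irow => (List.range M.length).foldl (pvInner M M.length irow) res)
          ((List.range (2 * M.length)).map
            (fun _ => (List.range (2 * M.length)).map (fun _ => (0 : Int)))) := by
  rfl

theorem pv_res0_eq (M : List (List Int)) :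
    ((List.range (2 * M.length)).map
        (fun _ => (List.range (2 * M.length)).map (fun _ => (0 : Int))))
      = pvOuterState M 0 := by
  unfold pvOuterState
  apply List.map_congr_left
  intro R _
  rw [if_neg (by omega), if_neg (by omega)]

theorem pv_pass_eq (M : List (List Int)) : pvPass M = pvOuterState M M.length := by
  rw [pv_pass_foldl, pv_res0_eq, pv_outer_fold M M.length le_rfl]

theorem pv_pass_eq_passMat (M : List (List Int)) (hM : M ≠ []) : pvPass M = pvPassMat M := by
  have hs : 0 < M.length := List.length_pos_iff.mpr hM
  rw [pv_pass_eq]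
  unfold pvOuterState pvPassMat
  apply List.map_congr_left
  intro R hR
  rw [List.mem_range] at hR
  by_cases h1 : R < M.length
  · rw [if_pos h1]
    unfold pvTopRow
    apply List.map_congr_left
    intro C _
    simp [Nat.mod_eq_of_lt h1, Nat.div_eq_of_lt h1]
  · rw [if_neg h1, if_pos (by omega)]
    unfold pvBotRow
    apply List.map_congr_left
    intro C _
    have e1 : R % M.length = R - M.length := by
      rw [Nat.mod_eq_sub_mod (by omega), Nat.mod_eq_of_lt (by omega)]
    have e2 : R / M.length = 1 := Nat.div_eq_of_lt_le (by omega) (by omega)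
    rw [e1, e2, one_mul]

theorem pv_gmat_getD (ca : List (List Int)) (k R C : Nat)
    (hR : R < ca.length * 2 ^ k) (hC : C < ca.length * 2 ^ k) :
    ((pvGmat ca k).getD R []).getD C 0
      = (ca.getD (R % ca.length) []).getD (C / 2 ^ k) 0 *
          (-1) ^ pvSgn k (R / ca.length) (C % 2 ^ k) := by
  unfold pvGmat
  rw [pv_getD_map_range _ _ _ _ hR, pv_getD_map_range _ _ _ _ hC]

theorem pv_passMat_getD (M : List (List Int)) (R C : Nat)
    (hR : R < 2 * M.length) (hC : C < 2 * M.length) :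
    ((pvPassMat M).getD R []).getD C 0
      = (M.getD (R % M.length) []).getD (C / 2) 0 * (-1) ^ (R / M.length * (C % 2)) := by
  unfold pvPassMat
  rw [pv_getD_map_range _ _ _ _ hR, pv_getD_map_range _ _ _ _ hC]

theorem pv_gg (xs : List (List Int)) (R C : Nat) (hR : R < xs.length)
    (hC : C < xs[R].length) : (xs.getD R []).getD C 0 = xs[R][C] := by
  rw [pv_getD_eq_getElem _ _ _ hR]
  exact pv_getD_eq_getElem _ _ _ hC

theorem pv_passMat_gmat_zero (ca : List (List Int)) (hca : ca ≠ []) :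
    pvPassMat ca = pvPassMat (pvGmat ca 0) := by
  have hm : 0 < ca.length := List.length_pos_iff.mpr hca
  have hL : (pvGmat ca 0).length = ca.length := by simp [pvGmat]
  unfold pvPassMat
  rw [hL]
  apply List.map_congr_left
  intro R hR
  rw [List.mem_range] at hR
  apply List.map_congr_left
  intro C hC
  rw [List.mem_range] at hC
  congr 1
  rw [pv_gmat_getD ca 0 _ _ (by simpa using Nat.mod_lt R hm) (by simp; omega)]
  simp [pvSgn, Nat.mod_mod_of_dvd R (dvd_refl ca.length)]

theorem pv_passMat_gmat (ca : List (List Int)) (hca : ca ≠ []) (k : Nat) :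
    pvPassMat (pvGmat ca k) = pvGmat ca (k + 1) := by
  have hm : 0 < ca.length := List.length_pos_iff.mpr hca
  have hL : (pvGmat ca k).length = ca.length * 2 ^ k := by simp [pvGmat]
  have hsk : 0 < ca.length * 2 ^ k := Nat.mul_pos hm (Nat.two_pow_pos k)
  have hlen2 : 2 * (ca.length * 2 ^ k) = ca.length * 2 ^ (k + 1) := by rw [pow_succ]; ring
  apply List.ext_getElem
  · simp only [pvPassMat, pvGmat, List.length_map, List.length_range, hL]
    rw [pow_succ]; ring
  intro R h1 h2
  have hR2 : R < 2 * (ca.length * 2 ^ k) := by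
    simpa [pvPassMat, hL] using h1
  apply List.ext_getElem
  · simp only [pvPassMat, pvGmat, List.getElem_map, List.getElem_range, List.length_map,
      List.length_range, hL]
    rw [pow_succ]; ring
  intro C hc1 hc2
  have hC2 : C < 2 * (ca.length * 2 ^ k) := by
    simpa [pvPassMat, hL] using hc1
  rw [← pv_gg _ _ _ h1 hc1, ← pv_gg _ _ _ h2 hc2]
  rw [pv_passMat_getD _ _ _ (by rw [hL]; exact hR2) (by rw [hL]; exact hC2)]
  rw [pv_gmat_getD ca (k + 1) R C (by omega) (by omega)]
  rw [hL]
  rw [pv_gmat_getD ca k (R % (ca.length * 2 ^ k)) (C / 2) (Nat.mod_lt _ hsk) (by omega)]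
  have ha : R % (ca.length * 2 ^ k) % ca.length = R % ca.length :=
    Nat.mod_mod_of_dvd R ⟨2 ^ k, rfl⟩
  have hbq : C / 2 / 2 ^ k = C / 2 ^ (k + 1) := by
    rw [Nat.div_div_eq_div_mul, ← pow_succ']
  have hc_ : pvSgn (k + 1) (R / ca.length) (C % 2 ^ (k + 1))
      = ((R / ca.length) >>> k) * (C % 2 ^ (k + 1) % 2)
        + pvSgn k (R / ca.length % 2 ^ k) (C % 2 ^ (k + 1) / 2) := by
    simp only [pvSgn]
  have hd : (R / ca.length) >>> k = R / (ca.length * 2 ^ k) := by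
    rw [Nat.shiftRight_eq_div_pow, Nat.div_div_eq_div_mul]
  have he : C % 2 ^ (k + 1) % 2 = C % 2 :=
    Nat.mod_mod_of_dvd C (dvd_pow_self 2 (Nat.succ_ne_zero k))
  have hf : R % (ca.length * 2 ^ k) / ca.length = R / ca.length % 2 ^ k :=
    Nat.mod_mul_right_div_self R ca.length (2 ^ k)
  have hg : C % 2 ^ (k + 1) / 2 = C / 2 % 2 ^ k := by
    rw [pow_succ']
    exact Nat.mod_mul_right_div_self C 2 (2 ^ k)
  rw [ha, hbq, hc_, hd, he, hf, hg, pow_add]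
  ring

theorem pv_gmat_ne_nil (ca : List (List Int)) (hca : ca ≠ []) (k : Nat) :
    pvGmat ca k ≠ [] := by
  have hm : 0 < ca.length := List.length_pos_iff.mpr hca
  refine List.length_pos_iff.mp ?_
  rw [show (pvGmat ca k).length = ca.length * 2 ^ k from by simp [pvGmat]]
  exact Nat.mul_pos hm (Nat.two_pow_pos k)

theorem pv_iterate (ca : List (List Int)) (hca : ca ≠ []) (j : Nat) :
    pvPass^[j + 1] ca = pvGmat ca (j + 1) := by
  induction j with
  | zero =>
      rw [Function.iterate_one, pv_pass_eq_passMat ca hca, pv_passMat_gmat_zero ca hca,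
        pv_passMat_gmat ca hca 0]
  | succ j ih =>
      rw [Function.iterate_succ_apply', ih,
        pv_pass_eq_passMat _ (pv_gmat_ne_nil ca hca (j + 1)), pv_passMat_gmat ca hca (j + 1)]

theorem pv_foldl_const {α β : Type} (f : β → β) (l : List α) (x : β) :
    l.foldl (fun acc _ => f acc) x = f^[l.length] x := by
  induction l generalizing x with
  | nil => rfl
  | cons a l ih => simp [List.foldl_cons, ih, Function.iterate_succ_apply]


theorem pv_getD_map_inrange {α β : Type} (f : α → β) (l : List α) (i : Nat) (d : β)
    (h : i < l.length) : (l.map f).getD i d = f l[i] := by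
  rw [List.getD_eq_getElem?_getD, List.getElem?_map, List.getElem?_eq_getElem h]
  rfl

theorem pv_pair_len (f g : Int → Int) (row : List Int) :
    (row.flatMap (fun v => [f v, g v])).length = 2 * row.length := by
  induction row with
  | nil => rfl
  | cons v t ih =>
      simp only [List.flatMap_cons, List.length_append, ih, List.length_cons, List.length_nil]
      omega

theorem pv_W_len (k : Nat) : (pvWStep^[k] [[(1 : Int)]]).length = 2 ^ k := by
  induction k with
  | zero => rfl
  | succ k ih =>
      rw [Function.iterate_succ_apply']
      simp only [pvWStep, List.length_append, List.length_map, ih]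
      have : (2 : Nat) ^ (k + 1) = 2 ^ k * 2 := by rw [pow_succ]
      omega

theorem pv_W_rowlen (k : Nat) (row : List Int) (h : row ∈ pvWStep^[k] [[(1 : Int)]]) :
    row.length = 2 ^ k := by
  induction k generalizing row with
  | zero =>
      simp only [Function.iterate_zero, id, List.mem_singleton] at h
      subst h; rfl
  | succ k ih =>
      rw [Function.iterate_succ_apply'] at h
      simp only [pvWStep, List.mem_append, List.mem_map] at h
      have hp : (2 : Nat) ^ (k + 1) = 2 ^ k * 2 := by rw [pow_succ]
      rcases h with ⟨r, hr, rfl⟩ | ⟨r, hr, rfl⟩ <;> rw [pv_pair_len, ih r hr] <;> omega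

theorem pv_pair_getD (f g : Int → Int) :
    ∀ (row : List Int) (b : Nat), b < 2 * row.length →
      (row.flatMap (fun v => [f v, g v])).getD b 0
        = if b % 2 = 0 then f (row.getD (b / 2) 0) else g (row.getD (b / 2) 0) := by
  intro row
  induction row with
  | nil => intro b hb; simp at hb
  | cons v t ih =>
      intro b hb
      rcases b with _ | b
      · simp [List.flatMap_cons]
      rcases b with _ | b
      · simp [List.flatMap_cons]
      simp only [List.flatMap_cons, List.cons_append, List.nil_append, List.getD_cons_succ]
      rw [ih b (by simp only [List.length_cons] at hb; omega)]
      have e1 : (b + 1 + 1) % 2 = b % 2 := by omega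
      have e2 : (b + 1 + 1) / 2 = b / 2 + 1 := by omega
      rw [e1, e2, List.getD_cons_succ]

theorem pv_W_getD :
    ∀ (k a b : Nat), a < 2 ^ k → b < 2 ^ k →
      ((pvWStep^[k] [[(1 : Int)]]).getD a []).getD b 0 = (-1 : Int) ^ pvSgn k a b := by
  intro k
  induction k with
  | zero =>
      intro a b ha hb
      have ha0 : a = 0 := by omega
      have hb0 : b = 0 := by omega
      subst ha0; subst hb0
      simp [pvSgn]
  | succ k ih =>
      intro a b ha hb
      have hlen : (pvWStep^[k] [[(1 : Int)]]).length = 2 ^ k := pv_W_len k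
      have hpow : (2 : Nat) ^ (k + 1) = 2 * 2 ^ k := by rw [pow_succ]; ring
      rw [Function.iterate_succ_apply']
      simp only [pvWStep]
      by_cases hat : a < 2 ^ k
      · rw [List.getD_append _ _ _ _ (by simp only [List.length_map, hlen]; exact hat)]
        rw [pv_getD_map_inrange _ _ _ _ (by rw [hlen]; exact hat)]
        have hrl : (pvWStep^[k] [[(1 : Int)]])[a].length = 2 ^ k := by
          have ha' : a < (pvWStep^[k] [[(1 : Int)]]).length := by rw [hlen]; exact hat
          exact pv_W_rowlen k _ (List.getElem_mem ha')
        rw [pv_pair_getD _ _ _ b (by rw [hrl]; omega), ite_self]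
        have ha' : a < (pvWStep^[k] [[(1 : Int)]]).length := by rw [hlen]; exact hat
        rw [← pv_getD_eq_getElem _ _ [] ha']
        rw [ih a (b / 2) hat (by omega)]
        congr 1
        simp only [pvSgn, Nat.shiftRight_eq_div_pow, Nat.div_eq_of_lt hat,
          Nat.mod_eq_of_lt hat, Nat.zero_mul, Nat.zero_add]
      · have hge : 2 ^ k ≤ a := by omega
        have hidx : a - 2 ^ k < 2 ^ k := by omega
        rw [List.getD_append_right _ _ _ _ (by simp only [List.length_map, hlen]; exact hge)]
        simp only [List.length_map, hlen]
        rw [pv_getD_map_inrange _ _ _ _ (by rw [hlen]; exact hidx)]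
        have hidx' : a - 2 ^ k < (pvWStep^[k] [[(1 : Int)]]).length := by rw [hlen]; exact hidx
        have hrl : (pvWStep^[k] [[(1 : Int)]])[a - 2 ^ k].length = 2 ^ k :=
          pv_W_rowlen k _ (List.getElem_mem hidx')
        rw [pv_pair_getD _ _ _ b (by rw [hrl]; omega)]
        rw [← pv_getD_eq_getElem _ _ [] hidx']
        rw [ih (a - 2 ^ k) (b / 2) hidx (by omega)]
        have hsgn : pvSgn (k + 1) a b = b % 2 + pvSgn k (a - 2 ^ k) (b / 2) := by
          simp only [pvSgn, Nat.shiftRight_eq_div_pow]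
          have h1 : a / 2 ^ k = 1 := Nat.div_eq_of_lt_le (by omega) (by omega)
          have h2 : a % 2 ^ k = a - 2 ^ k := by
            rw [Nat.mod_eq_sub_mod hge, Nat.mod_eq_of_lt hidx]
          rw [h1, h2, one_mul]
        rw [hsgn, pow_add]
        by_cases hb2 : b % 2 = 0
        · rw [if_pos hb2, hb2, pow_zero, one_mul]
        · have hb1 : b % 2 = 1 := by omega
          rw [if_neg hb2, hb1, pow_one, neg_one_mul]

theorem pv_blocks_len (m : Nat) (f : List Int → Nat → List Int) :
    ∀ w : List (List Int),
      (w.flatMap (fun wrow => (List.range m).map (f wrow))).length = w.length * m := by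
  intro w
  induction w with
  | nil => simp
  | cons r t ih =>
      simp only [List.flatMap_cons, List.length_append, List.length_map, List.length_range, ih,
        List.length_cons]
      ring

theorem pv_blocks_getD (m : Nat) (f : List Int → Nat → List Int) :
    ∀ (w : List (List Int)) (R : Nat), R < w.length * m →
      (w.flatMap (fun wrow => (List.range m).map (f wrow))).getD R []
        = f (w.getD (R / m) []) (R % m) := by
  intro w
  induction w with
  | nil => intro R hR; simp at hR
  | cons r t ih =>
      intro R hR
      have hm : 0 < m := by
        rcases Nat.eq_zero_or_pos m with h | h
        · subst h; simp at hR
        · exact h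
      simp only [List.flatMap_cons]
      by_cases hRm : R < m
      · rw [List.getD_append _ _ _ _ (by simp only [List.length_map, List.length_range]; exact hRm)]
        rw [pv_getD_map_inrange _ _ _ _ (by simp only [List.length_range]; exact hRm),
          List.getElem_range, Nat.div_eq_of_lt hRm, Nat.mod_eq_of_lt hRm, List.getD_cons_zero]
      · have hge : m ≤ R := by omega
        rw [List.getD_append_right _ _ _ _
          (by simp only [List.length_map, List.length_range]; exact hge)]
        simp only [List.length_map, List.length_range]
        rw [ih (R - m) (by
          simp only [List.length_cons] at hR
          have hx : (t.length + 1) * m = t.length * m + m := by ring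
          omega)]
        rw [Nat.div_eq_sub_div hm hge, Nat.mod_eq_sub_mod hge, List.getD_cons_succ]

theorem pv_take_getD (l : List Int) (m i : Nat) (h : i < m) :
    (l.take m).getD i 0 = l.getD i 0 := by
  rw [List.getD_eq_getElem?_getD, List.getElem?_take_of_lt h, ← List.getD_eq_getElem?_getD]

theorem pv_mulrow_len (wrow : List Int) :
    ∀ ts : List Int,
      (ts.flatMap (fun v => wrow.map (fun s => v * s))).length = ts.length * wrow.length := by
  intro ts
  induction ts with
  | nil => simp
  | cons v t ih =>
      simp only [List.flatMap_cons, List.length_append, List.length_map, ih, List.length_cons]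
      ring

theorem pv_mulrow_getD (wrow : List Int) (hw : 0 < wrow.length) :
    ∀ (ts : List Int) (C : Nat), C < ts.length * wrow.length →
      (ts.flatMap (fun v => wrow.map (fun s => v * s))).getD C 0
        = ts.getD (C / wrow.length) 0 * wrow.getD (C % wrow.length) 0 := by
  intro ts
  induction ts with
  | nil => intro C hC; simp at hC
  | cons v t ih =>
      intro C hC
      simp only [List.flatMap_cons]
      by_cases hCw : C < wrow.length
      · rw [List.getD_append _ _ _ _ (by simp only [List.length_map]; exact hCw)]
        rw [pv_getD_map_inrange _ _ _ _ hCw, Nat.div_eq_of_lt hCw, Nat.mod_eq_of_lt hCw,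
          List.getD_cons_zero, pv_getD_eq_getElem _ _ _ hCw]
      · have hge : wrow.length ≤ C := by omega
        rw [List.getD_append_right _ _ _ _ (by simp only [List.length_map]; exact hge)]
        simp only [List.length_map]
        rw [ih (C - wrow.length) (by
          simp only [List.length_cons] at hC
          have hx : (t.length + 1) * wrow.length = t.length * wrow.length + wrow.length := by ring
          omega)]
        rw [Nat.div_eq_sub_div hw hge, Nat.mod_eq_sub_mod hge, List.getD_cons_succ]

theorem pv_alt_eq_gmat (ca : List (List Int)) (n : Int) (hca : ca ≠ []) (hn : ¬ n ≤ 0)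
    (hrows : ∀ row ∈ ca, ca.length ≤ row.length) :
    walsh_matrix_alt ca n = pvGmat ca n.toNat := by
  have hm : 0 < ca.length := List.length_pos_iff.mpr hca
  have hp : 0 < 2 ^ n.toNat := Nat.two_pow_pos _
  rw [walsh_matrix_alt, if_neg (by simp [hca]; omega)]
  show ((PySem.List.pyRange 0 n 1).foldl (fun w _ => pvWStep w) [[1]]).flatMap
      (fun wrow => (List.range ca.length).map (fun r =>
        ((ca.getD r []).take ca.length).flatMap (fun v => wrow.map (fun s => v * s))))
    = pvGmat ca n.toNat
  rw [pv_foldl_const, PySem.List.length_pyRange_one]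
  have hnt : (n - 0).toNat = n.toNat := by omega
  rw [hnt]
  have hWlen : (pvWStep^[n.toNat] [[(1 : Int)]]).length = 2 ^ n.toNat := pv_W_len _
  apply List.ext_getElem
  · rw [pv_blocks_len]
    simp only [pvGmat, List.length_map, List.length_range, hWlen]
    ring
  intro R h1 h2
  have hR : R < ca.length * 2 ^ n.toNat := by simpa [pvGmat] using h2
  rw [← pv_getD_eq_getElem _ _ [] h1, ← pv_getD_eq_getElem _ _ [] h2]
  rw [pv_blocks_getD _ _ _ R (by rw [hWlen]; rw [Nat.mul_comm]; exact hR)]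
  have hgrow : (pvGmat ca n.toNat).getD R []
      = (List.range (ca.length * 2 ^ n.toNat)).map (fun C =>
          (ca.getD (R % ca.length) []).getD (C / 2 ^ n.toNat) 0 *
            (-1) ^ pvSgn n.toNat (R / ca.length) (C % 2 ^ n.toNat)) := by
    unfold pvGmat
    rw [pv_getD_map_range _ _ _ _ hR]
  rw [hgrow]
  have hdiv : R / ca.length < (pvWStep^[n.toNat] [[(1 : Int)]]).length := by
    rw [hWlen]
    exact (Nat.div_lt_iff_lt_mul hm).mpr (by rw [Nat.mul_comm]; exact hR)
  have hwrlen : ((pvWStep^[n.toNat] [[(1 : Int)]]).getD (R / ca.length) []).length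
      = 2 ^ n.toNat := by
    rw [pv_getD_eq_getElem _ _ _ hdiv]
    exact pv_W_rowlen _ _ (List.getElem_mem hdiv)
  have hcrow : ca.length ≤ (ca.getD (R % ca.length) []).length := by
    have hmod : R % ca.length < ca.length := Nat.mod_lt _ hm
    have hmem : ca.getD (R % ca.length) [] ∈ ca := by
      rw [pv_getD_eq_getElem _ _ _ hmod]
      exact List.getElem_mem hmod
    exact hrows _ hmem
  have htslen : ((ca.getD (R % ca.length) []).take ca.length).length = ca.length := by
    rw [List.length_take]
    exact Nat.min_eq_left hcrow
  apply List.ext_getElem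
  · rw [pv_mulrow_len, htslen, hwrlen]
    simp only [List.length_map, List.length_range]
  intro C hc1 hc2
  have hC : C < ca.length * 2 ^ n.toNat := by
    simpa only [List.length_map, List.length_range] using hc2
  rw [← pv_getD_eq_getElem _ _ 0 hc1, ← pv_getD_eq_getElem _ _ 0 hc2]
  rw [pv_getD_map_range _ _ _ _ hC]
  rw [pv_mulrow_getD _ (by rw [hwrlen]; exact hp) _ C (by rw [htslen, hwrlen]; exact hC)]
  rw [hwrlen]
  rw [pv_take_getD _ _ _ ((Nat.div_lt_iff_lt_mul hp).mpr hC)]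
  rw [pv_W_getD n.toNat (R / ca.length) (C % 2 ^ n.toNat)
    (by rw [← hWlen]; exact hdiv) (Nat.mod_lt _ hp)]

-- ===== VERDICT (by name: the statement is the Claim_ definition above) =====
theorem walsh_matrix_spec : Claim_equal_walsh_matrix := by
  intro ca n _ hpre
  unfold Spec_walsh_matrix
  by_cases hca : ca = []
  · simp [walsh_matrix, walsh_matrix_alt, hca]
  · by_cases hn : n ≤ 0
    · have hr : PySem.List.pyRange 0 n 1 = [] := PySem.List.pyRange_one_eq_nil (by omega)
      simp [walsh_matrix, walsh_matrix_alt, hca, hn, hr]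
    · have hnn : 0 < n.toNat := by omega
      have hrows : ∀ row ∈ ca, ca.length ≤ row.length := by
        rcases hpre with h | h | h
        · exact absurd h hca
        · exact absurd h hn
        · exact h
      rw [walsh_matrix, if_pos (by simp [hca]), pv_foldl_const,
        PySem.List.length_pyRange_one]
      have h1 : (n - 0).toNat = (n.toNat - 1) + 1 := by omega
      rw [h1, pv_iterate ca hca]
      have h2 : n.toNat - 1 + 1 = n.toNat := by omega
      rw [h2, pv_alt_eq_gmat ca n hca hn hrows]
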